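-- pv_equiv track=rewrite | github.com/Runarok/GeeksForGeeks-solutions | Difficulty: Easy/Choose and Swap/choose-and-swap.py | LexicographicallyMinimum
-- ===== SOURCE A (Python) =====
-- def LexicographicallyMinimum(str):
--     # Convert input string to a list A
--     A = str
--
--     # Sort and remove duplicates from the string to get the lexicographically smallest characters
--     s = sorted(set(A))
--
--     # Initialize variables to store the characters to be swapped
--     swap_a = None
--     swap_b = None
--
--     # Iterate through the string A to find a character greater than the lexicographically smallest character
--     for item in A:
--         # If a character larger than the smallest is found, set the swap characters
--         if ord(item) > ord(s[0]):
--             swap_a = item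
--             swap_b = s[0]
--             break
--         # If character equals the smallest, remove it from the sorted list
--         elif ord(item) == ord(s[0]):
--             s.pop(0)
--
--         # If no characters are left in the sorted list, return the string as is
--         if len(s) == 0:
--             return A
--
--     # Convert string to a list for mutable operations
--     A = list(A)
--
--     # Iterate through the list and swap the characters found earlier
--     for index in range(len(A)):
--         if A[index] == swap_a:
--             A[index] = swap_b
--         elif A[index] == swap_b:
--             A[index] = swap_a
--
--     # Join the list back into a string and return it
--     return "".join(A)
-- ===== SOURCE B (Python) =====
-- def LexicographicallyMinimum(str):
--     # Exhaustive search: try every unordered pair of distinct characters present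
--     # in the string, swap all their occurrences, and keep the lexicographically
--     # smallest result (the original string is the no-swap candidate).
--     distinct = sorted(set(str))
--     best = str
--     for i, c1 in enumerate(distinct):
--         for c2 in distinct[i + 1:]:
--             cand = str.translate({ord(c1): c2, ord(c2): c1})
--             if cand < best:
--                 best = cand
--     return best
-- ===== Notes on version B (the rewrite author's own statement) =====
-- stated objective: alternative
-- what changed: Replaces A's greedy scan (popping a sorted-distinct list to locate the one swap pair) with an exhaustive search that builds the swapped string for every unordered pair of distinct present characters and returns the lexicographic minimum of all candidates and the original string.
import Mathlib
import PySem

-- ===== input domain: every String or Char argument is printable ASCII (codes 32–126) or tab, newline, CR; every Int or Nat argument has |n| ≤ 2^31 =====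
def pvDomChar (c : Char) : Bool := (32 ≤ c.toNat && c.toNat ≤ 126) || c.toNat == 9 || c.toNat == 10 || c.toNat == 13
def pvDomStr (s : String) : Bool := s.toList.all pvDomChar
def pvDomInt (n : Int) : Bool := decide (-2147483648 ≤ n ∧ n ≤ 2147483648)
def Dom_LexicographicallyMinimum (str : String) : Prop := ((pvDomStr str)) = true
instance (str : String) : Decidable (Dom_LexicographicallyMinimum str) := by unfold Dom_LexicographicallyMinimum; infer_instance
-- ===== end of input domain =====

-- B replaces A's greedy find-the-swap scan by an exhaustive minimum over all swaps of
-- pairs of distinct present characters (alternative algorithm, not claimed faster).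

-- ===== PORT A =====
-- A's second loop: swap all occurrences of swap_a and swap_b.
def pvSwapA (a b : Char) (A : List Char) : List Char :=
  A.map (fun ch => if ch = a then b else if ch = b then a else ch)

-- A's first loop: scan the string against the sorted distinct characters s,
-- popping the head on equality; the first character exceeding the head fixes the
-- swap pair; if s empties (or the loop ends, leaving swap_a = None so that the
-- second loop does nothing) the string is returned unchanged (`none`).
def pvLoopA : List Char → List Char → Option (Char × Char)
  | [], _ => none
  | _ :: _, [] => none
  | it :: rest, h :: t =>
    if h < it then some (it, h)
    else if it = h then
      match t with
      | [] => none
      | _ :: _ => pvLoopA rest t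
    else pvLoopA rest (h :: t)

def LexicographicallyMinimum (str : String) : String :=
  let A := str.toList
  let s := PySem.List.sorted (PySem.Set.ofList A) (fun x => x)
  match pvLoopA A s with
  | none => String.mk A
  | some (a, b) => String.mk (pvSwapA a b A)

-- ===== PORT B =====
-- candidate: the string with all occurrences of c1 and c2 exchanged (str.translate)
def pvCandB (c1 c2 : Char) (A : List Char) : List Char :=
  A.map (fun ch => if ch = c1 then c2 else if ch = c2 then c1 else ch)

-- inner loop: for c2 in distinct[i+1:], keep the smaller candidate
def pvInnerB (A : List Char) (c1 : Char) (rest : List Char) (best : List Char) : List Char :=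
  rest.foldl (fun best c2 =>
    let cand := pvCandB c1 c2 A
    if cand < best then cand else best) best

-- outer loop: for i, c1 in enumerate(distinct)
def pvOuterB (A : List Char) : List Char → List Char → List Char
  | [], best => best
  | c1 :: rest, best => pvOuterB A rest (pvInnerB A c1 rest best)

def LexicographicallyMinimum_alt (str : String) : String :=
  let A := str.toList
  let distinct := PySem.List.sorted (PySem.Set.ofList A) (fun x => x)
  String.mk (pvOuterB A distinct A)

-- ===== PRECONDITION & SPEC =====
def Spec_LexicographicallyMinimum (str : String) (out : String) : Prop := out = LexicographicallyMinimum_alt str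
instance (str : String) (out : String) : Decidable (Spec_LexicographicallyMinimum str out) := by unfold Spec_LexicographicallyMinimum; infer_instance

-- ===== CLAIM (what is proved, stated in full; the proofs are below) =====
def Claim_equal_LexicographicallyMinimum : Prop := ∀ (str : String), Dom_LexicographicallyMinimum str → Spec_LexicographicallyMinimum str (LexicographicallyMinimum str)

-- ===== LEMMAS AND PROOFS =====

-- lists agreeing up to a first strictly smaller character are lexicographically smaller
lemma pvLt_mid (u v w : List Char) {x y : Char} (h : x < y) :
    u ++ x :: v < u ++ y :: w :=
  List.append_left_lt (List.cons_lt_cons_iff.mpr (Or.inl h))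

lemma pvMap_id_of (f : Char → Char) (u : List Char) (h : ∀ c ∈ u, f c = c) :
    u.map f = u :=
  (List.map_congr_left h).trans (List.map_id u)

-- swapping c1 ↔ c2 in u ++ w :: v when u contains neither character
lemma pvCandB_decomp (c1 c2 : Char) (u : List Char) (w : Char) (v : List Char)
    (hu : ∀ c ∈ u, c ≠ c1 ∧ c ≠ c2) :
    pvCandB c1 c2 (u ++ w :: v) =
      u ++ (if w = c1 then c2 else if w = c2 then c1 else w) ::
        v.map (fun ch => if ch = c1 then c2 else if ch = c2 then c1 else ch) := by
  unfold pvCandB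
  rw [List.map_append, List.map_cons,
    pvMap_id_of _ u (by intro c hc; simp [(hu c hc).1, (hu c hc).2])]

lemma pvCandB_comm (A : List Char) {c1 c2 : Char} (h : c1 ≠ c2) :
    pvCandB c1 c2 A = pvCandB c2 c1 A := by
  unfold pvCandB
  apply List.map_congr_left
  intro ch _
  by_cases h1 : ch = c1
  · subst h1; simp [h]
  · by_cases h2 : ch = c2
    · subst h2; simp [h.symm]
    · simp [h1, h2]

-- A's no-swap outcome: at every position, every smaller present character occurs earlier
def pvGood (A : List Char) : Prop :=
  ∀ u x v, A = u ++ x :: v → ∀ c ∈ A, c < x → c ∈ u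

-- A's swap outcome (a, b): a sits at the first position exceeding the smallest
-- character b not occurring in the prefix u before it, and u is itself pvGood-like
def pvTrig (A : List Char) (a b : Char) : Prop :=
  ∃ u v, A = u ++ a :: v ∧ b < a ∧ b ∈ A ∧ (∀ c ∈ u, c < b) ∧
    (∀ c ∈ A, c < b → c ∈ u) ∧ (∀ u1 x u2, u = u1 ++ x :: u2 → ∀ c ∈ A, c < x → c ∈ u1)

lemma pvGoodPrefix_snoc (A p : List Char) (it : Char)
    (h5 : ∀ u x v, p = u ++ x :: v → ∀ c ∈ A, c < x → c ∈ u)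
    (hit : ∀ c ∈ A, c < it → c ∈ p) :
    ∀ u x v, p ++ [it] = u ++ x :: v → ∀ c ∈ A, c < x → c ∈ u := by
  intro u x v heq c hc hcx
  rcases List.append_eq_append_iff.mp heq with ⟨k, hk1, hk2⟩ | ⟨k, hk1, hk2⟩
  · cases k with
    | nil =>
      simp only [List.nil_append] at hk2
      injection hk2 with hx hv
      subst hx
      rw [hk1, List.append_nil]
      exact hit c hc hcx
    | cons kh kt =>
      simp only [List.cons_append] at hk2
      injection hk2 with hx hv
      exact absurd hv.symm (by simp)
  · cases k with
    | nil =>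
      simp only [List.nil_append] at hk2
      injection hk2 with hx hv
      subst hx
      have hpu : p = u := by simpa using hk1
      rw [← hpu]
      exact hit c hc hcx
    | cons kh kt =>
      simp only [List.cons_append] at hk2
      injection hk2 with hx hv
      subst hx
      exact h5 u x kt hk1 c hc hcx

-- the loop invariant: p is the processed prefix, s the remaining sorted distinct characters
lemma pvLoopA_spec (A : List Char) :
    ∀ (rest p s : List Char),
      A = p ++ rest →
      s.Pairwise (· < ·) →
      (∀ c ∈ p, ∀ d ∈ s, c < d) →
      (∀ c ∈ A, c ∉ p → c ∈ s) →
      (∀ d ∈ s, d ∈ A) →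
      (∀ u x v, p = u ++ x :: v → ∀ c ∈ A, c < x → c ∈ u) →
      ((pvLoopA rest s = none → pvGood A) ∧
       (∀ a b, pvLoopA rest s = some (a, b) → pvTrig A a b)) := by
  intro rest
  induction rest with
  | nil =>
    intro p s hA _ _ _ _ h5
    refine ⟨fun _ => ?_, fun a b hab => by simp [pvLoopA] at hab⟩
    intro u x v heq c hc hcx
    have hpA : p = A := by simpa using hA.symm
    exact h5 u x v (hpA.trans heq) c hc hcx
  | cons it rest ih =>
    intro p s hA hs h1 h2 h3 h5
    cases s with
    | nil =>
      refine ⟨fun _ => ?_, fun a b hab => by simp [pvLoopA] at hab⟩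
      intro u x v heq c hc hcx
      have hcp : c ∈ p := by
        by_contra hnp
        exact absurd (h2 c hc hnp) (by simp)
      rcases List.append_eq_append_iff.mp (hA.symm.trans heq) with ⟨k, hk1, hk2⟩ | ⟨k, hk1, hk2⟩
      · rw [hk1]; exact List.mem_append_left _ hcp
      · cases k with
        | nil =>
          have hpu : p = u := by simpa using hk1
          rw [← hpu]; exact hcp
        | cons kh kt =>
          simp only [List.cons_append] at hk2
          injection hk2 with hx hv
          subst hx
          exact h5 u x kt hk1 c hc hcx
    | cons h t =>
      by_cases hlt : h < it
      · have hstep : pvLoopA (it :: rest) (h :: t) = some (it, h) := by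
          simp [pvLoopA, hlt]
        rw [hstep]
        refine ⟨fun hn => by simp at hn, fun a b hab => ?_⟩
        have hab' : it = a ∧ h = b := by
          injection hab with h'
          exact ⟨congrArg Prod.fst h', congrArg Prod.snd h'⟩
        obtain ⟨rfl, rfl⟩ := hab'
        refine ⟨p, rest, hA, hlt, h3 h (by simp), fun c hc => h1 c hc h (by simp), ?_, h5⟩
        intro c hc hcb
        by_contra hnp
        rcases List.mem_cons.mp (h2 c hc hnp) with rfl | hct
        · exact lt_irrefl _ hcb
        · exact absurd hcb (not_lt.mpr ((List.pairwise_cons.mp hs).1 c hct).le)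
      · by_cases heq2 : it = h
        · have hit : ∀ c ∈ A, c < it → c ∈ p := by
            intro c hc hcx
            by_contra hnp
            rcases List.mem_cons.mp (h2 c hc hnp) with rfl | hct
            · rw [heq2] at hcx; exact lt_irrefl _ hcx
            · have hhc : h < c := (List.pairwise_cons.mp hs).1 c hct
              rw [heq2] at hcx
              exact lt_irrefl _ (hcx.trans hhc)
          have h5' := pvGoodPrefix_snoc A p it h5 hit
          have hA' : A = (p ++ [it]) ++ rest := by rw [hA]; simp
          cases t with
          | nil =>
            have hstep : pvLoopA (it :: rest) [h] = none := by
              simp [pvLoopA, hlt, heq2]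
            rw [hstep]
            refine ⟨fun _ => ?_, fun a b hab => by simp at hab⟩
            intro u x v heqd c hc hcx
            have hcp : c ∈ p ++ [it] := by
              by_contra hnp
              have hc1 : c ∉ p := fun h' => hnp (List.mem_append_left _ h')
              rcases List.mem_cons.mp (h2 c hc hc1) with rfl | hct
              · exact hnp (List.mem_append_right _ (by rw [← heq2]; simp))
              · cases hct
            rcases List.append_eq_append_iff.mp (hA'.symm.trans heqd) with ⟨k, hk1, hk2⟩ | ⟨k, hk1, hk2⟩
            · rw [hk1]; exact List.mem_append_left _ hcp
            · cases k with
              | nil =>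
                have hpu : p ++ [it] = u := by simpa using hk1
                rw [← hpu]; exact hcp
              | cons kh kt =>
                simp only [List.cons_append] at hk2
                injection hk2 with hx hv
                subst hx
                exact h5' u x kt hk1 c hc hcx
          | cons th tt =>
            have hstep : pvLoopA (it :: rest) (h :: th :: tt) = pvLoopA rest (th :: tt) := by
              simp [pvLoopA, hlt, heq2]
            rw [hstep]
            have h1' : ∀ c ∈ p ++ [it], ∀ d ∈ th :: tt, c < d := by
              intro c hc d hd
              rcases List.mem_append.mp hc with hcp | hcit
              · exact h1 c hcp d (List.mem_cons_of_mem _ hd)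
              · have hci : c = it := by simpa using hcit
                rw [hci, heq2]
                exact (List.pairwise_cons.mp hs).1 d hd
            have h2' : ∀ c ∈ A, c ∉ p ++ [it] → c ∈ th :: tt := by
              intro c hc hnp
              have hc1 : c ∉ p := fun h' => hnp (List.mem_append_left _ h')
              rcases List.mem_cons.mp (h2 c hc hc1) with rfl | hct
              · exact absurd (List.mem_append_right _ (by rw [← heq2]; simp)) hnp
              · exact hct
            have h3' : ∀ d ∈ th :: tt, d ∈ A := fun d hd => h3 d (List.mem_cons_of_mem _ hd)
            exact ih (p ++ [it]) (th :: tt) hA' (List.pairwise_cons.mp hs).2 h1' h2' h3' h5'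
        · have hit2 : it < h := lt_of_le_of_ne (not_lt.mp hlt) heq2
          have hit : ∀ c ∈ A, c < it → c ∈ p := by
            intro c hc hcx
            by_contra hnp
            rcases List.mem_cons.mp (h2 c hc hnp) with rfl | hct
            · exact lt_irrefl _ (hcx.trans hit2)
            · exact lt_irrefl _ (((hcx.trans hit2).trans ((List.pairwise_cons.mp hs).1 c hct)))
          have hA' : A = (p ++ [it]) ++ rest := by rw [hA]; simp
          have h1' : ∀ c ∈ p ++ [it], ∀ d ∈ h :: t, c < d := by
            intro c hc d hd
            rcases List.mem_append.mp hc with hcp | hcit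
            · exact h1 c hcp d hd
            · have hci : c = it := by simpa using hcit
              rcases List.mem_cons.mp hd with rfl | hdt
              · rw [hci]; exact hit2
              · rw [hci]; exact hit2.trans ((List.pairwise_cons.mp hs).1 d hdt)
          have h2' : ∀ c ∈ A, c ∉ p ++ [it] → c ∈ h :: t := fun c hc hnp =>
            h2 c hc (fun h' => hnp (List.mem_append_left _ h'))
          have hstep : pvLoopA (it :: rest) (h :: t) = pvLoopA rest (h :: t) := by
            simp [pvLoopA, hlt, heq2]
          rw [hstep]
          exact ih (p ++ [it]) (h :: t) hA' hs h1' h2' h3 (pvGoodPrefix_snoc A p it h5 hit)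

-- split A at the first occurrence of c1 or c2
lemma pvFirstSplit (c1 c2 : Char) (A : List Char) (h : c1 ∈ A) :
    ∃ u w v, A = u ++ w :: v ∧ (w = c1 ∨ w = c2) ∧ ∀ c ∈ u, c ≠ c1 ∧ c ≠ c2 := by
  induction A with
  | nil => cases h
  | cons x xs ih =>
    by_cases hx1 : x = c1
    · exact ⟨[], x, xs, by simp, Or.inl hx1, by simp⟩
    · by_cases hx2 : x = c2
      · exact ⟨[], x, xs, by simp, Or.inr hx2, by simp⟩
      · have hmem : c1 ∈ xs := by
          rcases List.mem_cons.mp h with rfl | h'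
          · exact absurd rfl hx1
          · exact h'
        obtain ⟨u, w, v, ha, hb, hc⟩ := ih hmem
        refine ⟨x :: u, w, v, by simp [ha], hb, ?_⟩
        intro c hcm
        rcases List.mem_cons.mp hcm with rfl | hcu
        · exact ⟨hx1, hx2⟩
        · exact hc c hcu

-- the case where the first c1/c2 occurrence is exactly A's trigger position
lemma pvCenterCase (A u v : List Char) (a b c1 c2 : Char)
    (hA : A = u ++ a :: v) (hba : b < a)
    (hmin : ∀ c ∈ A, c < b → c ∈ u)
    (hL : pvCandB b a A = u ++ b :: v.map (fun ch => if ch = b then a else if ch = a then b else ch))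
    (hc1A : c1 ∈ A) (h12 : c1 < c2)
    (hfree : ∀ c ∈ u, c ≠ c1 ∧ c ≠ c2)
    (hw : a = c1 ∨ a = c2) :
    pvCandB b a A ≤ pvCandB c1 c2 A := by
  rcases hw with rfl | rfl
  · -- the trigger character is c1: the candidate raises it to c2 > b
    have hR : pvCandB a c2 A = u ++ c2 :: v.map (fun ch => if ch = a then c2 else if ch = c2 then a else ch) := by
      rw [hA, pvCandB_decomp a c2 u a v hfree]; simp
    rw [hL, hR]
    exact le_of_lt (pvLt_mid _ _ _ (hba.trans h12))
  · -- the trigger character is c2: the candidate puts c1 ≥ b there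
    have hc1u : c1 ∉ u := fun hc => (hfree c1 hc).1 rfl
    have hbc1 : b ≤ c1 := not_lt.mp (fun hlt => hc1u (hmin c1 hc1A hlt))
    rcases eq_or_lt_of_le hbc1 with rfl | hlt
    · exact le_rfl
    · have hR : pvCandB c1 a A = u ++ c1 :: v.map (fun ch => if ch = c1 then a else if ch = a then c1 else ch) := by
        rw [hA, pvCandB_decomp c1 a u a v hfree]
        simp [ne_of_gt h12]
      rw [hL, hR]
      exact le_of_lt (pvLt_mid _ _ _ hlt)

-- A's swap is no larger than any candidate swap of two distinct present characters
lemma pvTrig_le (A : List Char) {a b c1 c2 : Char}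
    (hT : pvTrig A a b) (hc1A : c1 ∈ A) (h12 : c1 < c2) :
    pvCandB b a A ≤ pvCandB c1 c2 A := by
  obtain ⟨u, v, hA, hba, hbA, hub, hmin, hP⟩ := hT
  have hufree : ∀ c ∈ u, c ≠ b ∧ c ≠ a := fun c hc =>
    ⟨ne_of_lt (hub c hc), ne_of_lt ((hub c hc).trans hba)⟩
  have hane : a ≠ b := ne_of_gt hba
  have hL : pvCandB b a A = u ++ b :: v.map (fun ch => if ch = b then a else if ch = a then b else ch) := by
    rw [hA, pvCandB_decomp b a u a v hufree]; simp [hane]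
  obtain ⟨u', w, v', hA2, hw, hfree⟩ := pvFirstSplit c1 c2 A hc1A
  rcases List.append_eq_append_iff.mp (hA.symm.trans hA2) with ⟨k, hk1, hk2⟩ | ⟨k, hk1, hk2⟩
  · -- u' = u ++ k, a :: v = k ++ w :: v'
    cases k with
    | nil =>
      have hk1' : u' = u := by simpa using hk1
      simp only [List.nil_append] at hk2
      injection hk2 with hwa hv'
      refine pvCenterCase A u v a b c1 c2 hA hba hmin hL hc1A h12
        (fun c hc => hfree c (by rw [hk1']; exact hc)) ?_
      rcases hw with h | h
      · exact Or.inl (hwa.trans h)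
      · exact Or.inr (hwa.trans h)
    | cons kh kt =>
      simp only [List.cons_append] at hk2
      injection hk2 with hak hv2
      -- a occurs inside u', hence a is neither c1 nor c2, and u is c1/c2-free
      have hau' : a ∈ u' := by
        rw [hk1, hak]; exact List.mem_append_right _ (by simp)
      have haf : a ≠ c1 ∧ a ≠ c2 := hfree a hau'
      have hufree2 : ∀ c ∈ u, c ≠ c1 ∧ c ≠ c2 := fun c hc =>
        hfree c (by rw [hk1]; exact List.mem_append_left _ hc)
      have hR : pvCandB c1 c2 A = u ++ a :: v.map (fun ch => if ch = c1 then c2 else if ch = c2 then c1 else ch) := by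
        rw [hA, pvCandB_decomp c1 c2 u a v hufree2]
        simp [haf.1, haf.2]
      rw [hL, hR]
      exact le_of_lt (pvLt_mid _ _ _ hba)
  · -- u = u' ++ k, w :: v' = k ++ a :: v
    cases k with
    | nil =>
      have hk1' : u = u' := by simpa using hk1
      simp only [List.nil_append] at hk2
      injection hk2 with hwa hv'
      refine pvCenterCase A u v a b c1 c2 hA hba hmin hL hc1A h12
        (fun c hc => hfree c (by rw [← hk1']; exact hc)) ?_
      rcases hw with h | h
      · exact Or.inl (hwa.symm.trans h)
      · exact Or.inr (hwa.symm.trans h)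
    | cons kh kt =>
      simp only [List.cons_append] at hk2
      injection hk2 with hwk hv2
      rcases hw with h | h
      · -- first occurrence (of c1) lies inside u: the candidate raises it to c2
        have hRu' : pvCandB c1 c2 A = u' ++ c2 :: v'.map (fun ch => if ch = c1 then c2 else if ch = c2 then c1 else ch) := by
          rw [hA2, pvCandB_decomp c1 c2 u' w v' hfree, h]; simp
        have hLu' : pvCandB b a A = u' ++ c1 :: (kt ++ b :: v.map (fun ch => if ch = b then a else if ch = a then b else ch)) := by
          rw [hL, hk1, ← hwk, h]; simp
        rw [hLu', hRu']
        exact le_of_lt (pvLt_mid _ _ _ h12)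
      · -- w = c2 inside u is impossible: c1 < c2 would have to occur before it in u'
        have hc1u' : c1 ∈ u' := hP u' w kt (by rw [hk1, hwk]) c1 hc1A (by rw [h]; exact h12)
        exact absurd rfl ((hfree c1 hc1u').1)

lemma pvTrig_le_id (A : List Char) {a b : Char} (hT : pvTrig A a b) :
    pvCandB b a A ≤ A := by
  obtain ⟨u, v, hA, hba, _, hub, _, _⟩ := hT
  have hufree : ∀ c ∈ u, c ≠ b ∧ c ≠ a := fun c hc =>
    ⟨ne_of_lt (hub c hc), ne_of_lt ((hub c hc).trans hba)⟩
  have hane : a ≠ b := ne_of_gt hba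
  have hL : pvCandB b a A = u ++ b :: v.map (fun ch => if ch = b then a else if ch = a then b else ch) := by
    rw [hA, pvCandB_decomp b a u a v hufree]; simp [hane]
  rw [hL]
  conv_rhs => rw [hA]
  exact le_of_lt (pvLt_mid _ _ _ hba)

lemma pvTrig_facts (A : List Char) {a b : Char} (hT : pvTrig A a b) :
    b < a ∧ a ∈ A ∧ b ∈ A := by
  obtain ⟨u, v, hA, hba, hbA, _, _, _⟩ := hT
  exact ⟨hba, by rw [hA]; simp, hbA⟩

-- A's no-swap string is no larger than any candidate swap
lemma pvGood_le (A : List Char) {c1 c2 : Char} (hG : pvGood A) (hc1A : c1 ∈ A) (h12 : c1 < c2) :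
    A ≤ pvCandB c1 c2 A := by
  obtain ⟨u', w, v', hA2, hw, hfree⟩ := pvFirstSplit c1 c2 A hc1A
  rcases hw with h | h
  · subst h
    have hR : pvCandB w c2 A = u' ++ c2 :: v'.map (fun ch => if ch = w then c2 else if ch = c2 then w else ch) := by
      rw [hA2, pvCandB_decomp w c2 u' w v' hfree]; simp
    rw [hR]
    conv_lhs => rw [hA2]
    exact le_of_lt (pvLt_mid _ _ _ h12)
  · subst h
    have hmem : c1 ∈ u' := hG u' w v' hA2 c1 hc1A h12
    exact absurd rfl ((hfree c1 hmem).1)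

-- the running-minimum fold of port B
def pvFmin (best : List Char) (xs : List (List Char)) : List Char :=
  xs.foldl (fun b c => if c < b then c else b) best

lemma pvFmin_le_init (xs : List (List Char)) : ∀ best, pvFmin best xs ≤ best := by
  induction xs with
  | nil => intro best; exact le_rfl
  | cons x t ih =>
    intro best
    show pvFmin (if x < best then x else best) t ≤ best
    by_cases h : x < best
    · rw [if_pos h]; exact (ih x).trans h.le
    · rw [if_neg h]; exact ih best
  
lemma pvFmin_le_mem (xs : List (List Char)) : ∀ best c, c ∈ xs → pvFmin best xs ≤ c := by
  induction xs with
  | nil => intro best c hc; cases hc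
  | cons x t ih =>
    intro best c hc
    show pvFmin (if x < best then x else best) t ≤ c
    rcases List.mem_cons.mp hc with rfl | hct
    · by_cases h : c < best
      · rw [if_pos h]; exact pvFmin_le_init t c
      · rw [if_neg h]; exact (pvFmin_le_init t best).trans (not_lt.mp h)
    · exact ih _ c hct

lemma pvFmin_mem (xs : List (List Char)) : ∀ best, pvFmin best xs = best ∨ pvFmin best xs ∈ xs := by
  induction xs with
  | nil => intro best; exact Or.inl rfl
  | cons x t ih =>
    intro best
    rcases ih (if x < best then x else best) with h | h
    · show pvFmin (if x < best then x else best) t = best ∨ pvFmin (if x < best then x else best) t ∈ x :: t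
      rw [h]
      split_ifs with hx
      · exact Or.inr (by simp)
      · exact Or.inl rfl
    · exact Or.inr (List.mem_cons_of_mem _ h)

-- all ordered pairs drawn from ds (first component before second)
def pvPairsOf : List Char → List (Char × Char)
  | [] => []
  | c :: rest => rest.map (fun d => (c, d)) ++ pvPairsOf rest

lemma pvPairsOf_forward : ∀ (ds : List Char), ds.Pairwise (· < ·) →
    ∀ q ∈ pvPairsOf ds, q.1 ∈ ds ∧ q.2 ∈ ds ∧ q.1 < q.2 := by
  intro ds
  induction ds with
  | nil => intro _ q hq; cases hq
  | cons c rest ih =>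
    intro hp q hq
    simp only [pvPairsOf] at hq
    rcases List.mem_append.mp hq with h | h
    · obtain ⟨d, hd, rfl⟩ := List.mem_map.mp h
      exact ⟨by simp, by simp [hd], (List.pairwise_cons.mp hp).1 d hd⟩
    · obtain ⟨h1, h2, h3⟩ := ih (List.pairwise_cons.mp hp).2 q h
      exact ⟨by simp [h1], by simp [h2], h3⟩

lemma pvPairsOf_backward : ∀ (ds : List Char), ds.Pairwise (· < ·) →
    ∀ x y, x ∈ ds → y ∈ ds → x < y → (x, y) ∈ pvPairsOf ds := by
  intro ds
  induction ds with
  | nil => intro _ x y hx _ _; cases hx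
  | cons c rest ih =>
    intro hp x y hx hy hxy
    simp only [pvPairsOf, List.mem_append]
    rcases List.mem_cons.mp hx with rfl | hxr
    · left
      have hyr : y ∈ rest := by
        rcases List.mem_cons.mp hy with rfl | h'
        · exact absurd hxy (lt_irrefl _)
        · exact h'
      exact List.mem_map.mpr ⟨y, hyr, rfl⟩
    · right
      have hyr : y ∈ rest := by
        rcases List.mem_cons.mp hy with rfl | h'
        · exact absurd hxy (not_lt.mpr ((List.pairwise_cons.mp hp).1 x hxr).le)
        · exact h'
      exact ih (List.pairwise_cons.mp hp).2 x y hxr hyr hxy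

lemma pvInnerB_eq (A : List Char) (c : Char) (rest best : List Char) :
    pvInnerB A c rest best = pvFmin best (rest.map (fun d => pvCandB c d A)) := by
  simp [pvInnerB, pvFmin, List.foldl_map]

lemma pvOuterB_eq (A : List Char) : ∀ ds best,
    pvOuterB A ds best = pvFmin best ((pvPairsOf ds).map (fun q => pvCandB q.1 q.2 A)) := by
  intro ds
  induction ds with
  | nil => intro best; rfl
  | cons c rest ih =>
    intro best
    rw [show pvOuterB A (c :: rest) best = pvOuterB A rest (pvInnerB A c rest best) from rfl,
      ih, pvInnerB_eq]
    simp [pvPairsOf, pvFmin, List.foldl_append, List.map_map, Function.comp_def]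

-- ===== VERDICT (by name: the statement is the Claim_ definition above) =====
theorem LexicographicallyMinimum_spec : Claim_equal_LexicographicallyMinimum := by
  unfold Claim_equal_LexicographicallyMinimum
  intro str _
  unfold Spec_LexicographicallyMinimum
  show (match pvLoopA str.toList (PySem.List.sorted (PySem.Set.ofList str.toList) (fun x => x)) with
        | none => String.mk str.toList
        | some (a, b) => String.mk (pvSwapA a b str.toList)) =
       String.mk (pvOuterB str.toList (PySem.List.sorted (PySem.Set.ofList str.toList) (fun x => x)) str.toList)
  set A := str.toList with hAdef
  set D := PySem.List.sorted (PySem.Set.ofList A) (fun x => x) with hDdef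
  have hpw : D.Pairwise (· < ·) := PySem.List.sorted_ofList_pairwise_lt A
  have hDmem : ∀ x : Char, x ∈ D ↔ x ∈ A := by
    intro x
    rw [hDdef, PySem.List.mem_sorted, PySem.Set.mem_ofList]
  have hloop := pvLoopA_spec A A [] D rfl hpw (by simp)
      (fun c hc _ => (hDmem c).mpr hc) (fun d hd => (hDmem d).mp hd)
      (by intro u x v h; exact absurd h (by simp))
  rw [pvOuterB_eq]
  cases hv : pvLoopA A D with
  | none =>
    have hG := hloop.1 hv
    have hmin : pvFmin A ((pvPairsOf D).map (fun q => pvCandB q.1 q.2 A)) = A := by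
      refine le_antisymm (pvFmin_le_init _ _) ?_
      rcases pvFmin_mem ((pvPairsOf D).map (fun q => pvCandB q.1 q.2 A)) A with h | h
      · rw [h]
      · obtain ⟨q, hq, hqe⟩ := List.mem_map.mp h
        obtain ⟨h1, h2, h3⟩ := pvPairsOf_forward D hpw q hq
        rw [← hqe]
        exact pvGood_le A hG ((hDmem q.1).mp h1) h3
    rw [hmin]
  | some ab =>
    obtain ⟨a, b⟩ := ab
    have hT := hloop.2 a b hv
    have hf := pvTrig_facts A hT
    have hgeq : pvSwapA a b A = pvCandB b a A := pvCandB_comm A (ne_of_gt hf.1)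
    have hgmem : pvCandB b a A ∈ (pvPairsOf D).map (fun q => pvCandB q.1 q.2 A) :=
      List.mem_map.mpr ⟨(b, a),
        pvPairsOf_backward D hpw b a ((hDmem b).mpr hf.2.2) ((hDmem a).mpr hf.2.1) hf.1, rfl⟩
    have heqm : pvFmin A ((pvPairsOf D).map (fun q => pvCandB q.1 q.2 A)) = pvCandB b a A := by
      refine le_antisymm (pvFmin_le_mem _ _ _ hgmem) ?_
      rcases pvFmin_mem ((pvPairsOf D).map (fun q => pvCandB q.1 q.2 A)) A with h | h
      · rw [h]; exact pvTrig_le_id A hT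
      · obtain ⟨q, hq, hqe⟩ := List.mem_map.mp h
        obtain ⟨h1, h2, h3⟩ := pvPairsOf_forward D hpw q hq
        rw [← hqe]
        exact pvTrig_le A hT ((hDmem q.1).mp h1) h3
    show String.mk (pvSwapA a b A) = String.mk (pvFmin A ((pvPairsOf D).map (fun q => pvCandB q.1 q.2 A)))
    rw [hgeq, heqm]
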